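-- pv_equiv track=rewrite | github.com/thesanju/LLM_home_Assistant | testing.py | extract_servo_command
-- ===== SOURCE A (Python) =====
-- def extract_servo_command(text):
--     """Extract servo angle from text, including directional commands."""
--     text = text.lower()
--     words = text.split()
--
--     # Handle directional commands
--     directional_mapping = {
--         "left": 180,
--         "right": 0,
--         "center": 90,
--         "middle": 90,
--         "straight": 90,
--         "forward": 90
--     }
--
--     # First check for directional commands
--     for word in words:
--         if word in directional_mapping:
--             return directional_mapping[word]
--
--     # Then check for explicit angle numbers
--     try:
--         for i, word in enumerate(words):
--             if any(keyword in word for keyword in ["servo", "move", "turn", "rotate"]):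
--                 for j in range(i, min(i + 3, len(words))):
--                     if words[j].isdigit():
--                         angle = int(words[j])
--                         if 0 <= angle <= 180:
--                             return angle
--     except:
--         pass
--
--     return None
-- ===== SOURCE B (Python) =====
-- def extract_servo_command(text):
--     """Extract servo angle from text, including directional commands."""
--     words = text.lower().split()
--
--     directional_mapping = {
--         "left": 180,
--         "right": 0,
--         "center": 90,
--         "middle": 90,
--         "straight": 90,
--         "forward": 90
--     }
--
--     # First check for directional commands
--     for word in words:
--         if word in directional_mapping:
--             return directional_mapping[word]
--
--     # Single pass with a countdown window: a trigger word opens a 3-word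
--     # window (itself plus the next two words) in which a digit 0..180 is
--     # accepted; the first such digit word is returned.
--     countdown = 0
--     for word in words:
--         if any(keyword in word for keyword in ["servo", "move", "turn", "rotate"]):
--             countdown = 3
--         if countdown > 0 and word.isdigit():
--             angle = int(word)
--             if 0 <= angle <= 180:
--                 return angle
--         countdown -= 1
--
--     return None
-- ===== Notes on version B (the rewrite author's own statement) =====
-- stated objective: simpler
-- what changed: The numeric phase's nested loop (per-trigger inner index window over range(i, min(i+3, len)) with repeated indexing) is replaced by a single linear pass maintaining a countdown: a trigger word opens a 3-word window and the first in-range digit word inside any open window is returned.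
import Mathlib
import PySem

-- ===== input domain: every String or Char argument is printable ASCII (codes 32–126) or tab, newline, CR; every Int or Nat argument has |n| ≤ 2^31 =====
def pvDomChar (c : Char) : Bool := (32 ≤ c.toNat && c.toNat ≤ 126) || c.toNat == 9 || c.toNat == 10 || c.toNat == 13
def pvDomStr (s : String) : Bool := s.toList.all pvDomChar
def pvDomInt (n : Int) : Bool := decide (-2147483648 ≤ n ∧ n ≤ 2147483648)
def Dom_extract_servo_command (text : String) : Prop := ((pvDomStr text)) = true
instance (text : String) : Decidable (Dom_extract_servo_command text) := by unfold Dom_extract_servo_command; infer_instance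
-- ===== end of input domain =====

-- B replaces A's nested numeric scan (per-trigger inner window with indexing) by a
-- single linear countdown pass; objective: simpler (same O(n) cost, one pass, no indexing).


-- ===== PORT A =====
-- helpers shared verbatim by both Pythons (dict literal, directional first-match loop, trigger test)
def pvDirectionalMapping : PySem.Dict String Int :=
  PySem.Dict.ofList [("left", 180), ("right", 0), ("center", 90), ("middle", 90), ("straight", 90), ("forward", 90)]

def pvDirLoop : List String → Option Int
  | [] => none
  | w :: rest =>
    if pvDirectionalMapping.contains w then pvDirectionalMapping.get? w else pvDirLoop rest

def pvKeywords : List String := ["servo", "move", "turn", "rotate"]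

def pvIsTrigger (w : String) : Bool := pvKeywords.any (fun k => PySem.Str.isIn k w)

-- inner loop: 'for j in range(i, min(i + 3, len(words)))'
def pvInnerA (words : List String) : List Int → Option Int
  | [] => none
  | j :: rest =>
    match PySem.List.pyGet? words j with
    | none => none            -- IndexError: unreachable, j comes from range(i, min(i+3, len))
    | some wj =>
      if PySem.Str.strIsdigit wj then
        match PySem.Int.ofStr? wj with
        | none => pvInnerA words rest  -- ValueError: unreachable after isdigit on ASCII input
        | some angle =>
          if 0 ≤ angle ∧ angle ≤ 180 then some angle else pvInnerA words rest
      else pvInnerA words rest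

-- outer loop: 'for i, word in enumerate(words)'
def pvOuterA (words : List String) : List (Int × String) → Option Int
  | [] => none
  | (i, w) :: rest =>
    if pvIsTrigger w then
      match pvInnerA words (PySem.List.pyRange i (min (i + 3) (words.length : Int)) 1) with
      | some a => some a
      | none => pvOuterA words rest
    else pvOuterA words rest

def extract_servo_command (text : String) : Option Int :=
  let words := PySem.Str.split₀ (PySem.Str.lower text)
  match pvDirLoop words with
  | some a => some a
  | none => pvOuterA words (PySem.List.enumerate words 0)

-- ===== PORT B =====
-- single pass with an integer countdown window
def pvNumScan : List String → Int → Option Int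
  | [], _ => none
  | w :: rest, countdown =>
    let cd := if pvIsTrigger w then 3 else countdown
    if 0 < cd ∧ PySem.Str.strIsdigit w then
      match PySem.Int.ofStr? w with
      | none => pvNumScan rest (cd - 1)  -- ValueError: unreachable after isdigit on ASCII input
      | some angle =>
        if 0 ≤ angle ∧ angle ≤ 180 then some angle else pvNumScan rest (cd - 1)
    else pvNumScan rest (cd - 1)

def extract_servo_command_alt (text : String) : Option Int :=
  let words := PySem.Str.split₀ (PySem.Str.lower text)
  match pvDirLoop words with
  | some a => some a
  | none => pvNumScan words 0

-- ===== PRECONDITION & SPEC =====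
def Spec_extract_servo_command (text : String) (out : Option Int) : Prop := out = extract_servo_command_alt text
instance (text : String) (out : Option Int) : Decidable (Spec_extract_servo_command text out) := by unfold Spec_extract_servo_command; infer_instance

-- ===== CLAIM (what is proved, stated in full; the proofs are below) =====
def Claim_equal_extract_servo_command : Prop := ∀ (text : String), Dom_extract_servo_command text → Spec_extract_servo_command text (extract_servo_command text)

-- ===== LEMMAS AND PROOFS =====

-- the value accepted at one word: digit word whose int value lies in [0, 180]
def pvVal? (w : String) : Option Int :=
  if PySem.Str.strIsdigit w then
    match PySem.Int.ofStr? w with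
    | none => none
    | some angle => if 0 ≤ angle ∧ angle ≤ 180 then some angle else none
  else none

-- first accepted value in a list of words
def pvFirstValid : List String → Option Int
  | [] => none
  | w :: rest => (pvVal? w).or (pvFirstValid rest)

lemma pvVal?_or (w : String) (c : Option Int) :
    (if PySem.Str.strIsdigit w then
      match PySem.Int.ofStr? w with
      | none => c
      | some angle => if 0 ≤ angle ∧ angle ≤ 180 then some angle else c
    else c) = (pvVal? w).or c := by
  unfold pvVal?
  cases hd : PySem.Str.strIsdigit w <;> simp
  cases hofs : PySem.Int.ofStr? w <;> simp
  split <;> simp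

lemma pvInnerA_window (words : List String) (k : Nat) :
    ∀ (a : Nat), a + k ≤ words.length →
      pvInnerA words (PySem.List.pyRange (a : Int) ((a : Int) + (k : Int)) 1) =
        pvFirstValid ((words.drop a).take k) := by
  induction k with
  | zero =>
    intro a ha
    rw [PySem.List.pyRange_one_eq_nil (by omega)]
    simp [pvInnerA, pvFirstValid]
  | succ k ih =>
    intro a ha
    rw [PySem.List.pyRange_one_cons (by push_cast; omega)]
    have hlt : a < words.length := by omega
    have hdrop : words.drop a = words[a] :: words.drop (a + 1) := List.drop_eq_getElem_cons hlt
    have hget : PySem.List.pyGet? words (a : Int) = some words[a] := by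
      simp [PySem.List.pyGet?_natCast, List.getElem?_eq_getElem hlt]
    have hrec : ((a : Int) + 1) = ((a + 1 : Nat) : Int) := by push_cast; ring
    have hend : ((a : Int) + ((k + 1 : Nat) : Int)) = (((a + 1 : Nat) : Int) + (k : Int)) := by push_cast; ring
    show pvInnerA words ((a : Int) :: PySem.List.pyRange ((a : Int) + 1) _ 1) = _
    unfold pvInnerA
    rw [hget]
    simp only [hrec, hend]
    rw [ih (a + 1) (by omega)]
    rw [hdrop]
    rw [List.take_succ_cons]
    rw [show pvFirstValid (words[a] :: (words.drop (a+1)).take k) =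
          (pvVal? words[a]).or (pvFirstValid ((words.drop (a+1)).take k)) from rfl]
    exact pvVal?_or _ _

lemma pvScanBody_or (cd : Int) (hcd : 0 < cd) (w : String) (c : Option Int) :
    (if 0 < cd ∧ PySem.Str.strIsdigit w then
      match PySem.Int.ofStr? w with
      | none => c
      | some angle => if 0 ≤ angle ∧ angle ≤ 180 then some angle else c
    else c) = (pvVal? w).or c := by
  rw [← pvVal?_or w c]
  simp [hcd]

lemma pvFirstValid_append (l₁ l₂ : List String) :
    pvFirstValid (l₁ ++ l₂) = (pvFirstValid l₁).or (pvFirstValid l₂) := by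
  induction l₁ with
  | nil => simp [pvFirstValid]
  | cons w t ih => simp [pvFirstValid, ih, Option.or_assoc]

lemma pvFirstValid_prefix_or {l₁ l₂ : List String} (h : l₁ <+: l₂) (x : Option Int) :
    (pvFirstValid l₁).or ((pvFirstValid l₂).or x) = (pvFirstValid l₂).or x := by
  obtain ⟨t, rfl⟩ := h
  rw [pvFirstValid_append]
  cases pvFirstValid l₁ <;> simp

lemma pvScan_eq (suf : List String) :
    ∀ (pre : List String) (cd : Int), cd ≤ 3 →
      pvNumScan suf cd =
        (pvFirstValid (suf.take cd.toNat)).or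
          (pvOuterA (pre ++ suf) (PySem.List.enumerate suf (pre.length : Int))) := by
  induction suf with
  | nil => intro pre cd hcd; simp [pvNumScan, pvOuterA, PySem.List.enumerate, pvFirstValid]
  | cons w rest ih =>
    intro pre cd hcd
    have h1app : (pre ++ [w]) ++ rest = pre ++ w :: rest := by simp
    have h2len : (((pre ++ [w]).length : Nat) : Int) = (pre.length : Int) + 1 := by
      simp [List.length_append]
    rw [PySem.List.enumerate_cons]
    by_cases ht : pvIsTrigger w = true
    · -- trigger case: countdown is reset to 3, matching the inner 3-word window of A
      have hlen : (((pre ++ w :: rest).length : Nat) : Int) =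
          (pre.length : Int) + ((rest.length + 1 : Nat) : Int) := by
        simp [List.length_append]
      have hmin : min ((pre.length : Int) + 3) ((pre.length : Int) + ((rest.length + 1 : Nat) : Int)) =
          (pre.length : Int) + ((min 3 (rest.length + 1) : Nat) : Int) := by
        push_cast; omega
      have hwin : pvInnerA (pre ++ w :: rest)
            (PySem.List.pyRange (pre.length : Int)
              (min ((pre.length : Int) + 3) (((pre ++ w :: rest).length : Nat) : Int)) 1) =
          pvFirstValid ((w :: rest).take 3) := by
        rw [hlen, hmin, pvInnerA_window (pre ++ w :: rest) (min 3 (rest.length + 1)) pre.length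
            (by simp only [List.length_append, List.length_cons]; omega)]
        congr 1
        rw [List.drop_left, ← List.take_take]
        congr 1
        exact List.take_of_length_le (by simp)
      have htake3 : pvFirstValid ((w :: rest).take 3) = (pvVal? w).or (pvFirstValid (rest.take 2)) := rfl
      have hpre : (w :: rest).take cd.toNat <+: (w :: rest).take 3 :=
        List.take_prefix_take_left (by omega)
      have key := pvFirstValid_prefix_or hpre
        (pvOuterA (pre ++ w :: rest) (PySem.List.enumerate rest ((pre.length : Int) + 1)))
      rw [htake3] at key
      have hIH := ih (pre ++ [w]) 2 (by norm_num)
      rw [h1app, h2len] at hIH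
      show pvNumScan (w :: rest) cd = _
      unfold pvNumScan
      simp only [ht, if_true]
      rw [pvScanBody_or 3 (by norm_num), show (3 : Int) - 1 = 2 from rfl, hIH]
      simp only [pvOuterA, ht, if_true]
      rw [hwin, htake3]
      rw [show ((2 : Int).toNat) = 2 from rfl, ← Option.or_assoc]
      cases hq : (pvVal? w).or (pvFirstValid (rest.take 2)) with
      | some a =>
        rw [hq] at key
        simp only [Option.some_or] at key ⊢
        exact key.symm
      | none =>
        rw [hq] at key
        simp only [Option.none_or] at key ⊢
        exact key.symm
    · -- non-trigger case: countdown is carried unchanged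
      have ht' : pvIsTrigger w = false := by simpa using ht
      have hIH := ih (pre ++ [w]) (cd - 1) (by omega)
      rw [h1app, h2len] at hIH
      show pvNumScan (w :: rest) cd = _
      unfold pvNumScan
      simp only [ht', Bool.false_eq_true, if_false]
      simp only [pvOuterA, ht', Bool.false_eq_true, if_false]
      by_cases hpos : 0 < cd
      · rw [pvScanBody_or cd hpos, hIH]
        have htn : cd.toNat = (cd - 1).toNat + 1 := by omega
        rw [htn, List.take_succ_cons,
          show pvFirstValid (w :: List.take (cd - 1).toNat rest) =
            (pvVal? w).or (pvFirstValid (List.take (cd - 1).toNat rest)) from rfl,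
          Option.or_assoc]
      · have hguard : ¬ (0 < cd ∧ PySem.Str.strIsdigit w = true) := by tauto
        rw [if_neg hguard, hIH]
        have h1 : (cd - 1).toNat = 0 := by omega
        have h0 : cd.toNat = 0 := by omega
        rw [h1, h0]
        simp [pvFirstValid]

-- ===== VERDICT (by name: the statement is the Claim_ definition above) =====
theorem extract_servo_command_spec : Claim_equal_extract_servo_command := by
  intro text _
  unfold Spec_extract_servo_command extract_servo_command extract_servo_command_alt
  set words := PySem.Str.split₀ (PySem.Str.lower text) with hw
  cases h : pvDirLoop words with
  | some a => simp [h]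
  | none =>
    simp only [h]
    have heq := pvScan_eq words [] 0 (by norm_num)
    simpa [pvFirstValid] using heq.symm
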